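-- pv_equiv track=rewrite | github.com/erickllaureano/TestSectionA | objects_ordering.py | ordering_data_by_priority
-- ===== SOURCE A (Python) =====
-- priorities = ['Highest', 'High', 'Medium', 'Low', 'Lowest']
--
-- def searching_move_data(temporary_data, pre_ordered_data, key, value):
--     index_to_delet = 0
--     while index_to_delet < len(temporary_data):
--         key_value = temporary_data[index_to_delet].get(
--             key, ''
--         )
--         if key_value == value:
--             pre_ordered_data.append(
--                 temporary_data.pop(index_to_delet)
--             )
--             index_to_delet = 0
--         else:
--             index_to_delet += 1
--
-- def ordering_data_by_priority(pre_data_list):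
--     pre_ordered_data = list()
--     temporary_data = pre_data_list[:]
--     for priority in priorities:
--         searching_move_data(
--             temporary_data,
--             pre_ordered_data,
--             'priority',
--             priority
--         )
--     pre_ordered_data += temporary_data
--     return pre_ordered_data
-- ===== SOURCE B (Python) =====
-- priorities = ['Highest', 'High', 'Medium', 'Low', 'Lowest']
--
-- def ordering_data_by_priority(pre_data_list):
--     buckets = {}
--     rest = []
--     for item in pre_data_list:
--         p = item.get('priority', '')
--         if p in priorities:
--             buckets.setdefault(p, []).append(item)
--         else:
--             rest.append(item)
--     ordered = []
--     for p in priorities: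
--         ordered += buckets.get(p, [])
--     return ordered + rest
-- ===== Notes on version B (the rewrite author's own statement) =====
-- stated objective: alternative
-- what changed: Replaces A's per-priority scan-and-pop passes over a shrinking copy (index reset to 0 after every removal) by a single pass that distributes items into per-priority buckets plus a leftover list and then concatenates the buckets in priority order.
import Mathlib
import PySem

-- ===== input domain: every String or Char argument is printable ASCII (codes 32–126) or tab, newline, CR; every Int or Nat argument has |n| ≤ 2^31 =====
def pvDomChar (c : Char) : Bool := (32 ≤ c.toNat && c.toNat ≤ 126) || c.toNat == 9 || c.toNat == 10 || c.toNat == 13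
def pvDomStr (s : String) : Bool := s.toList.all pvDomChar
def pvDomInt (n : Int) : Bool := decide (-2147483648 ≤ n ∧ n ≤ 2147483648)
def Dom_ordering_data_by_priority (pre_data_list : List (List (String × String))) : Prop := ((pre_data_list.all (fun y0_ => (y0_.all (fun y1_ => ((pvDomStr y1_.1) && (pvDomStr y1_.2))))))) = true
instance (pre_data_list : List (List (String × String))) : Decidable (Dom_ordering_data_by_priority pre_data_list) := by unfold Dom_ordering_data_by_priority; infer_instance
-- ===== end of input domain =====

-- B makes a single pass distributing items into per-priority buckets plus a leftover list,
-- then concatenates, instead of A's per-priority scan-and-pop passes; return values proved equal.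

-- ===== PORT A =====
def prioritiesA : List String := ["Highest", "High", "Medium", "Low", "Lowest"]

-- the 'while index_to_delet < len(temporary_data)' loop of searching_move_data
def smdLoop (key value : String) (temporary_data pre_ordered_data : List (List (String × String)))
    (index_to_delet : Nat) : List (List (String × String)) × List (List (String × String)) :=
  if h : index_to_delet < temporary_data.length then
    let key_value := PySem.Dict.getD ⟨temporary_data[index_to_delet]⟩ key ""
    if key_value == value then
      -- temporary_data.pop(index_to_delet) appended to pre_ordered_data; index reset to 0
      smdLoop key value (temporary_data.eraseIdx index_to_delet)
        (pre_ordered_data ++ [temporary_data[index_to_delet]]) 0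
    else
      smdLoop key value temporary_data pre_ordered_data (index_to_delet + 1)
  else
    (temporary_data, pre_ordered_data)
termination_by (temporary_data.length, temporary_data.length - index_to_delet)
decreasing_by
  · simp [List.length_eraseIdx, h]
    exact Prod.Lex.left _ _ (by omega)
  · exact Prod.Lex.right _ (by omega)

-- searching_move_data mutates its two list arguments; ported as returning the pair
-- (temporary_data, pre_ordered_data) after the loop
def searching_move_data (temporary_data pre_ordered_data : List (List (String × String)))
    (key value : String) : List (List (String × String)) × List (List (String × String)) :=
  smdLoop key value temporary_data pre_ordered_data 0

def ordering_data_by_priority (pre_data_list : List (List (String × String))) :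
    List (List (String × String)) :=
  let st := prioritiesA.foldl
    (fun st priority => searching_move_data st.1 st.2 "priority" priority)
    (pre_data_list, ([] : List (List (String × String))))
  st.2 ++ st.1

-- ===== PORT B =====
def prioritiesB : List String := ["Highest", "High", "Medium", "Low", "Lowest"]

def ordering_data_by_priority_alt (pre_data_list : List (List (String × String))) :
    List (List (String × String)) :=
  let st := pre_data_list.foldl
    (fun (st : PySem.Dict String (List (List (String × String))) × List (List (String × String))) item =>
      let p := PySem.Dict.getD ⟨item⟩ "priority" ""
      if prioritiesB.contains p then
        (st.1.modify p [] (· ++ [item]), st.2)   -- buckets.setdefault(p, []).append(item)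
      else
        (st.1, st.2 ++ [item]))
    (PySem.Dict.empty, ([] : List (List (String × String))))
  let ordered := prioritiesB.foldl (fun out p => out ++ st.1.getD p []) []
  ordered ++ st.2

-- ===== PRECONDITION & SPEC =====
def Spec_ordering_data_by_priority (pre_data_list : List (List (String × String))) (out : List (List (String × String))) : Prop := out = ordering_data_by_priority_alt pre_data_list
instance (pre_data_list : List (List (String × String))) (out : List (List (String × String))) : Decidable (Spec_ordering_data_by_priority pre_data_list out) := by unfold Spec_ordering_data_by_priority; infer_instance

-- ===== CLAIM (what is proved, stated in full; the proofs are below) =====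
def Claim_equal_ordering_data_by_priority : Prop := ∀ (pre_data_list : List (List (String × String))), Dom_ordering_data_by_priority pre_data_list → Spec_ordering_data_by_priority pre_data_list (ordering_data_by_priority pre_data_list)

-- ===== LEMMAS AND PROOFS =====

def pvGp (x : List (String × String)) : String := PySem.Dict.getD ⟨x⟩ "priority" ""

theorem smdLoop_spec (value : String) (temp acc : List (List (String × String))) (idx : Nat)
    (hf : ∀ x ∈ temp.take idx, (pvGp x == value) = false) :
    smdLoop "priority" value temp acc idx =
      (temp.filter (fun x => !(pvGp x == value)),
       acc ++ temp.filter (fun x => pvGp x == value)) := by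
  fun_induction smdLoop "priority" value temp acc idx with
  | case1 temp acc idx h kv hkv ih =>
    rw [ih (by simp)]
    have hdec : temp = temp.take idx ++ temp[idx] :: temp.drop (idx + 1) := by
      rw [List.getElem_cons_drop]; exact (List.take_append_drop idx temp).symm
    have herase : temp.eraseIdx idx = temp.take idx ++ temp.drop (idx + 1) :=
      List.eraseIdx_eq_take_drop_succ temp idx
    have hx : (pvGp temp[idx] == value) = true := hkv
    have h1 : (temp.take idx).filter (fun x => pvGp x == value) = [] := by
      rw [List.filter_eq_nil_iff]; intro x hx2; simp [hf x hx2]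
    refine Prod.ext ?_ ?_
    · rw [herase]
      conv_rhs => rw [hdec]
      simp only [List.filter_append, List.filter_cons, hx]
      simp
    · rw [herase]
      conv_rhs => rw [hdec]
      simp only [List.filter_append, List.filter_cons, hx, h1]
      simp
  | case2 temp acc idx h kv hkv ih =>
    apply ih
    intro x hx
    rcases List.mem_take_iff_getElem.mp hx with ⟨j, hj, rfl⟩
    by_cases hje : j = idx
    · subst hje; simpa using hkv
    · exact hf _ (List.mem_take_iff_getElem.mpr ⟨j, by omega, rfl⟩)
  | case3 temp acc idx h =>
    have htake : temp.take idx = temp := List.take_of_length_le (by omega)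
    rw [htake] at hf
    have h1 : temp.filter (fun x => pvGp x == value) = [] := by
      rw [List.filter_eq_nil_iff]; intro x hx2; simp [hf x hx2]
    have h2 : temp.filter (fun x => !(pvGp x == value)) = temp := by
      rw [List.filter_eq_self]; intro x hx2; simp [hf x hx2]
    simp [h1, h2]

theorem foldA_spec (ps : List String) (hnd : ps.Nodup) (l acc : List (List (String × String))) :
    ps.foldl (fun st p => searching_move_data st.1 st.2 "priority" p) (l, acc) =
      (l.filter (fun x => ps.all (fun p => !(pvGp x == p))),
       acc ++ ps.flatMap (fun p => l.filter (fun x => pvGp x == p))) := by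
  induction ps generalizing l acc with
  | nil => simp
  | cons p ps ih =>
    simp only [List.foldl_cons, List.flatMap_cons]
    rw [searching_move_data, smdLoop_spec p l acc 0 (by simp)]
    rw [ih ((List.nodup_cons.mp hnd).2)]
    have hp : p ∉ ps := (List.nodup_cons.mp hnd).1
    refine Prod.ext ?_ ?_
    · simp only [List.filter_filter]
      apply List.filter_congr
      intro x _
      simp [List.all_cons, Bool.and_comm]
    · simp only [List.append_assoc, List.append_cancel_left_eq]
      apply List.flatMap_congr
      intro q hq
      have hpq : p ≠ q := fun e => hp (e ▸ hq)
      rw [List.filter_filter]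
      apply List.filter_congr
      intro x _
      by_cases hxq : pvGp x = q
      · simp [hxq, hpq.symm]
      · simp [hxq]


theorem foldB_spec (l : List (List (String × String)))
    (d0 : PySem.Dict String (List (List (String × String)))) (r0 : List (List (String × String))) :
    (l.foldl
      (fun (st : PySem.Dict String (List (List (String × String))) × List (List (String × String))) item =>
        if prioritiesB.contains (PySem.Dict.getD ⟨item⟩ "priority" "") = true then
          (st.1.modify (PySem.Dict.getD ⟨item⟩ "priority" "") [] (· ++ [item]), st.2)
        else
          (st.1, st.2 ++ [item]))
      (d0, r0)).2 = r0 ++ l.filter (fun x => !(prioritiesB.contains (pvGp x))) ∧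
    (∀ p, ((l.foldl
      (fun (st : PySem.Dict String (List (List (String × String))) × List (List (String × String))) item =>
        if prioritiesB.contains (PySem.Dict.getD ⟨item⟩ "priority" "") = true then
          (st.1.modify (PySem.Dict.getD ⟨item⟩ "priority" "") [] (· ++ [item]), st.2)
        else
          (st.1, st.2 ++ [item]))
      (d0, r0)).1).getD p [] =
        d0.getD p [] ++ l.filter (fun x => (pvGp x == p) && prioritiesB.contains (pvGp x))) := by
  induction l generalizing d0 r0 with
  | nil => simp
  | cons item l ih =>
    simp only [List.foldl_cons]
    by_cases hc : prioritiesB.contains (PySem.Dict.getD ⟨item⟩ "priority" "") = true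
    · rw [if_pos hc]
      obtain ⟨ih2, ih1⟩ := ih (d0.modify (PySem.Dict.getD ⟨item⟩ "priority" "") [] (· ++ [item])) r0
      have hm : PySem.Dict.getD ⟨item⟩ "priority" "" ∈ prioritiesB :=
        List.mem_of_elem_eq_true hc
      refine ⟨?_, ?_⟩
      · rw [ih2, List.filter_cons]
        simp [pvGp, hc, hm]
      · intro p
        rw [ih1 p, PySem.Dict.getD_modify, List.filter_cons]
        by_cases hp : PySem.Dict.getD ⟨item⟩ "priority" "" = p
        · subst hp
          rw [if_pos rfl]
          simp [pvGp, hc, hm]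
        · rw [if_neg (fun e => hp (Eq.symm e))]
          have hb : (pvGp item == p) = false := by simp [pvGp, hp]
          simp [hb]
    · rw [if_neg hc]
      obtain ⟨ih2, ih1⟩ := ih d0 (r0 ++ [item])
      have hnm : pvGp item ∉ prioritiesB := by
        intro hm
        exact hc (List.elem_eq_true_of_mem hm)
      have hcf : (prioritiesB.contains (pvGp item)) = false := by
        simpa [pvGp] using hc
      refine ⟨?_, ?_⟩
      · rw [ih2, List.filter_cons]
        simp [hcf, hnm]
      · intro p
        rw [ih1 p, List.filter_cons]
        simp [hcf, hnm]

-- ===== VERDICT (by name: the statement is the Claim_ definition above) =====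
theorem ordering_data_by_priority_spec : Claim_equal_ordering_data_by_priority := by
  intro l _
  unfold Spec_ordering_data_by_priority ordering_data_by_priority ordering_data_by_priority_alt
  dsimp only
  rw [foldA_spec prioritiesA (by decide) l []]
  obtain ⟨h2, h1⟩ := foldB_spec l PySem.Dict.empty []
  rw [h2]
  rw [PySem.List.foldl_append_eq_flatMap]
  simp only [List.nil_append]
  congr 1
  · show prioritiesA.flatMap _ = prioritiesB.flatMap _
    apply List.flatMap_congr
    intro p hp
    rw [h1 p]
    simp only [PySem.Dict.getD_empty, List.nil_append]
    apply List.filter_congr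
    intro x _
    by_cases hx : pvGp x = p
    · have hpB : p ∈ prioritiesB := hp
      have hcp : prioritiesB.contains p = true := List.elem_eq_true_of_mem hpB
      simp [hx, hcp, hpB]
    · have hb : (pvGp x == p) = false := by simp [hx]
      simp only [hb, Bool.false_and]
  · apply List.filter_congr
    intro x _
    show prioritiesA.all _ = _
    by_cases hm : pvGp x ∈ prioritiesB
    · have : prioritiesB.contains (pvGp x) = true := List.elem_iff.mpr hm
      rw [this]
      simp only [Bool.not_true]
      rw [List.all_eq_false]
      exact ⟨pvGp x, hm, by simp⟩
    · have : prioritiesB.contains (pvGp x) = false := by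
        simpa using hm
      rw [this]
      simp only [Bool.not_false]
      rw [List.all_eq_true]
      intro p hp
      have hne : ¬ pvGp x = p := fun e => hm (by rw [e]; exact hp)
      simp [hne]
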